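-- pv_equiv track=rewrite | github.com/stevewyl/nlp_toolkit | nlp_toolkit/chunk_segmentor/tagger.py | split_sent
-- ===== SOURCE A (Python) =====
-- def split_sent(possible_idx, num_split, max_length, word_list):
--     start = 0
--     end = max_length
--     if len(possible_idx) > 0:
--         for _ in range(num_split):
--             sub_possible_idx = [
--                 idx for idx in possible_idx if idx > start and idx <= end]
--             if sub_possible_idx != []:
--                 end = max(sub_possible_idx, key=lambda x: x - end)
--                 yield word_list[start:end+1]
--                 start = end + 1
--             end += max_length
--         yield word_list[start:]
--     else:
--         yield word_list
-- ===== SOURCE B (Python) =====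
-- def split_sent(possible_idx, num_split, max_length, word_list):
--     if not possible_idx:
--         yield word_list
--         return
--     idxs = sorted(possible_idx)
--     n = len(idxs)
--     start = 0
--     end = max_length
--     for _ in range(num_split):
--         # lo = bisect_right(idxs, end), hand-written (no imports available)
--         lo, hi = 0, n
--         while lo < hi:
--             mid = (lo + hi) // 2
--             if idxs[mid] <= end:
--                 lo = mid + 1
--             else:
--                 hi = mid
--         if lo > 0 and idxs[lo - 1] > start:
--             end = idxs[lo - 1]
--             yield word_list[start:end + 1]
--             start = end + 1
--         end += max_length
--     yield word_list[start:]
-- ===== Notes on version B (the rewrite author's own statement) =====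
-- stated objective: faster
-- what changed: B sorts possible_idx once and replaces A's per-round linear filter-and-max scan by a hand-written binary search (bisect_right) for the largest index in (start, end], so each of the num_split rounds costs O(log n) instead of O(n).
import Mathlib
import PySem

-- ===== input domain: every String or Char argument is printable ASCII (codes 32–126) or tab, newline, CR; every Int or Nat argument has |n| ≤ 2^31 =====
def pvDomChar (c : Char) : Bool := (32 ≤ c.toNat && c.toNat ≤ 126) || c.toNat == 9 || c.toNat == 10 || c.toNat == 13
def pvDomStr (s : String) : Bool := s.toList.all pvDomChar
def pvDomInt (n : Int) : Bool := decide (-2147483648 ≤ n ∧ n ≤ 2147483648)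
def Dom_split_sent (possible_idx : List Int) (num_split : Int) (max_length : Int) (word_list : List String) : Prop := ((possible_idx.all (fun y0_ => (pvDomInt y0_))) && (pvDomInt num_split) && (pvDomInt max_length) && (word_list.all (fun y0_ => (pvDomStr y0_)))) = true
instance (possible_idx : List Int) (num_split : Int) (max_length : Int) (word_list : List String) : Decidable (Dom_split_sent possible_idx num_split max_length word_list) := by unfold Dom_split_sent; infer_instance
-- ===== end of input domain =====

-- B sorts possible_idx once and finds each round's boundary by binary search instead of
-- A's per-round linear filter-and-max scan; return values proved equal (A, a generator,
-- is ported as the list of its yields).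

-- ===== PORT A =====
-- loop body of A's 'for _ in range(num_split)'; state = (start, end, yields so far)
def pvStepA (possible_idx : List Int) (max_length : Int) (word_list : List String)
    (st : Int × Int × List (List String)) (_i : Int) : Int × Int × List (List String) :=
  let start := st.1
  let e := st.2.1
  let acc := st.2.2
  let sub := possible_idx.filter (fun idx => decide (idx > start) && decide (idx ≤ e))
  if sub ≠ [] then
    -- max(sub, key=λx. x-end); sub ≠ [] so max? is some; the .getD 0 default is unreachable
    let e' := (PySem.List.max? sub (fun x => x - e)).getD 0
    (e' + 1, e' + max_length, acc ++ [PySem.List.slice word_list (some start) (some (e' + 1))])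
  else
    (start, e + max_length, acc)

def split_sent (possible_idx : List Int) (num_split : Int) (max_length : Int) (word_list : List String) : List (List String) :=
  if possible_idx.length > 0 then
    let st := (PySem.List.pyRange 0 num_split 1).foldl (pvStepA possible_idx max_length word_list) (0, max_length, [])
    st.2.2 ++ [PySem.List.slice word_list (some st.1) none]
  else
    [word_list]

-- ===== PORT B =====
-- hand-written bisect_right loop of Source B; idxs[mid] is always in range (lo ≤ mid < hi ≤ len),
-- so the .getD default is unreachable
-- structural recursion on a fuel that provably suffices (hi - lo shrinks every iteration),
-- so the fuel-exhausted branch coincides with the loop-exit branch and the port is exact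
def pvBisectGo (idxs : List Int) (e : Int) : Nat → Nat → Nat → Nat
  | 0, lo, _hi => lo
  | fuel + 1, lo, hi =>
    if lo < hi then
      let mid := (lo + hi) / 2
      if idxs.getD mid 0 ≤ e then pvBisectGo idxs e fuel (mid + 1) hi
      else pvBisectGo idxs e fuel lo mid
    else lo

def pvBisect (idxs : List Int) (e : Int) (lo hi : Nat) : Nat :=
  pvBisectGo idxs e (hi - lo) lo hi

-- loop body of B's 'for _ in range(num_split)'
def pvStepB (idxs : List Int) (max_length : Int) (word_list : List String)
    (st : Int × Int × List (List String)) (_i : Int) : Int × Int × List (List String) :=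
  let start := st.1
  let e := st.2.1
  let acc := st.2.2
  let lo := pvBisect idxs e 0 idxs.length
  -- 'lo > 0 and idxs[lo-1] > start'; when lo > 0 the index lo-1 is in range, default unreachable
  if decide (lo > 0) && decide (idxs.getD (lo - 1) 0 > start) then
    let e' := idxs.getD (lo - 1) 0
    (e' + 1, e' + max_length, acc ++ [PySem.List.slice word_list (some start) (some (e' + 1))])
  else
    (start, e + max_length, acc)

def split_sent_alt (possible_idx : List Int) (num_split : Int) (max_length : Int) (word_list : List String) : List (List String) :=
  if possible_idx = [] then
    [word_list]
  else
    let idxs := PySem.List.sorted possible_idx (fun x => x)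
    let st := (PySem.List.pyRange 0 num_split 1).foldl (pvStepB idxs max_length word_list) (0, max_length, [])
    st.2.2 ++ [PySem.List.slice word_list (some st.1) none]

-- ===== PRECONDITION & SPEC =====
def Spec_split_sent (possible_idx : List Int) (num_split : Int) (max_length : Int) (word_list : List String) (out : List (List String)) : Prop := out = split_sent_alt possible_idx num_split max_length word_list
instance (possible_idx : List Int) (num_split : Int) (max_length : Int) (word_list : List String) (out : List (List String)) : Decidable (Spec_split_sent possible_idx num_split max_length word_list out) := by unfold Spec_split_sent; infer_instance

-- ===== CLAIM (what is proved, stated in full; the proofs are below) =====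
def Claim_equal_split_sent : Prop := ∀ (possible_idx : List Int) (num_split : Int) (max_length : Int) (word_list : List String), Dom_split_sent possible_idx num_split max_length word_list → Spec_split_sent possible_idx num_split max_length word_list (split_sent possible_idx num_split max_length word_list)

-- ===== LEMMAS AND PROOFS =====

-- binary-search invariant: pvBisect refines [lo,hi) keeping "everything left ≤ e, everything right > e"
theorem pvBisect_loop_spec (L : List Int) (e : Int) (hp : L.Pairwise (· ≤ ·))
    (lo hi : Nat) :
    hi ≤ L.length → lo ≤ hi →
    (∀ j (hj : j < L.length), j < lo → L[j] ≤ e) →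
    (∀ j (hj : j < L.length), hi ≤ j → e < L[j]) →
    pvBisect L e lo hi ≤ L.length ∧
    (∀ j (hj : j < L.length), j < pvBisect L e lo hi → L[j] ≤ e) ∧
    (∀ j (hj : j < L.length), pvBisect L e lo hi ≤ j → e < L[j]) := by
  unfold pvBisect
  have hpg : ∀ (a b : Nat) (ha : a < L.length) (hb : b < L.length), a ≤ b → L[a] ≤ L[b] := by
    intro a b ha hb hab
    rcases Nat.lt_or_eq_of_le hab with h | h
    · exact (List.pairwise_iff_getElem.mp hp) a b ha hb h
    · subst h; exact le_refl _
  suffices hgo : ∀ (fuel lo hi : Nat), hi - lo ≤ fuel → hi ≤ L.length → lo ≤ hi →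
      (∀ j (hj : j < L.length), j < lo → L[j] ≤ e) →
      (∀ j (hj : j < L.length), hi ≤ j → e < L[j]) →
      pvBisectGo L e fuel lo hi ≤ L.length ∧
      (∀ j (hj : j < L.length), j < pvBisectGo L e fuel lo hi → L[j] ≤ e) ∧
      (∀ j (hj : j < L.length), pvBisectGo L e fuel lo hi ≤ j → e < L[j]) by
    intro hhi hlohi h1 h2
    exact hgo (hi - lo) lo hi (le_refl _) hhi hlohi h1 h2
  intro fuel
  induction fuel with
  | zero =>
    intro lo hi hfuel hhi hlohi h1 h2
    have : lo = hi := by omega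
    subst this
    simp only [pvBisectGo]
    exact ⟨by omega, h1, h2⟩
  | succ fuel ih =>
    intro lo hi hfuel hhi hlohi h1 h2
    by_cases hlt : lo < hi
    · have hmidlt : (lo + hi) / 2 < hi := by omega
      have hmidge : lo ≤ (lo + hi) / 2 := by omega
      have hmidlen : (lo + hi) / 2 < L.length := by omega
      have hmidval : L.getD ((lo + hi) / 2) 0 = L[(lo + hi) / 2] :=
        List.getD_eq_getElem L 0 hmidlen
      by_cases hmid : L.getD ((lo + hi) / 2) 0 ≤ e
      · have hres : pvBisectGo L e (fuel + 1) lo hi = pvBisectGo L e fuel ((lo + hi) / 2 + 1) hi := by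
          simp only [pvBisectGo, if_pos hlt, if_pos hmid]
        rw [hres]
        refine ih ((lo + hi) / 2 + 1) hi (by omega) hhi (by omega) ?_ h2
        intro j hj hjlt
        exact le_trans (hpg j ((lo + hi) / 2) hj hmidlen (by omega))
          (by rw [hmidval] at hmid; exact hmid)
      · have hres : pvBisectGo L e (fuel + 1) lo hi = pvBisectGo L e fuel lo ((lo + hi) / 2) := by
          simp only [pvBisectGo, if_pos hlt, if_neg hmid]
        rw [hres]
        refine ih lo ((lo + hi) / 2) (by omega) (by omega) (by omega) h1 ?_
        intro j hj hjge
        refine lt_of_lt_of_le ?_ (hpg ((lo + hi) / 2) j hmidlen hj hjge)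
        rw [hmidval] at hmid; omega
    · have : lo = hi := by omega
      subst this
      have hres : pvBisectGo L e (fuel + 1) lo lo = lo := by
        simp [pvBisectGo]
      rw [hres]
      exact ⟨by omega, h1, h2⟩

theorem pvBisect_spec (L : List Int) (e : Int) (hp : L.Pairwise (· ≤ ·)) :
    pvBisect L e 0 L.length ≤ L.length ∧
    (∀ j (hj : j < L.length), j < pvBisect L e 0 L.length → L[j] ≤ e) ∧
    (∀ j (hj : j < L.length), pvBisect L e 0 L.length ≤ j → e < L[j]) := by
  exact pvBisect_loop_spec L e hp 0 L.length (le_refl _) (Nat.zero_le _)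
    (fun j hj hjlt => absurd hjlt (Nat.not_lt_zero j))
    (fun j hj hjge => absurd hj (by omega))

-- the two loop bodies agree once idxs = sorted possible_idx
theorem pvStep_eq (possible_idx : List Int) (max_length : Int) (word_list : List String)
    (st : Int × Int × List (List String)) (i : Int) :
    pvStepA possible_idx max_length word_list st i =
    pvStepB (PySem.List.sorted possible_idx (fun x => x)) max_length word_list st i := by
  obtain ⟨start, e, acc⟩ := st
  have hp : (PySem.List.sorted possible_idx (fun x => x)).Pairwise (· ≤ ·) :=
    PySem.List.sorted_pairwise possible_idx (fun x => x)
  have hperm : (PySem.List.sorted possible_idx (fun x => x)).Perm possible_idx :=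
    PySem.List.sorted_perm possible_idx (fun x => x) false
  set L := PySem.List.sorted possible_idx (fun x => x) with hLdef
  have hpg : ∀ (a b : Nat) (ha : a < L.length) (hb : b < L.length), a ≤ b → L[a] ≤ L[b] := by
    intro a b ha hb hab
    rcases Nat.lt_or_eq_of_le hab with h | h
    · exact (List.pairwise_iff_getElem.mp hp) a b ha hb h
    · subst h; exact le_refl _
  obtain ⟨hle, hleft, hright⟩ := pvBisect_spec L e hp
  set lo := pvBisect L e 0 L.length with hlodef
  set sub := possible_idx.filter (fun idx => decide (idx > start) && decide (idx ≤ e)) with hsubdef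
  by_cases hc : 0 < lo ∧ start < L.getD (lo - 1) 0
  · -- both programs split, at the same index
    obtain ⟨hlo0, hstart⟩ := hc
    have hlo1 : lo - 1 < L.length := by omega
    have hmval : L.getD (lo - 1) 0 = L[lo - 1] := List.getD_eq_getElem L 0 hlo1
    set m := L.getD (lo - 1) 0 with hmdef
    have hm_le : m ≤ e := by rw [hmval]; exact hleft (lo - 1) hlo1 (by omega)
    have hm_mem : m ∈ possible_idx := hperm.mem_iff.mp (by rw [hmval]; exact List.getElem_mem hlo1)
    have hm_sub : m ∈ sub := by
      rw [hsubdef, List.mem_filter]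
      exact ⟨hm_mem, by simp [hstart, hm_le]⟩
    have hsub_ne : sub ≠ [] := List.ne_nil_of_mem hm_sub
    have hmax : PySem.List.max? sub (fun x => x - e) = some m := by
      cases hmx : PySem.List.max? sub (fun x => x - e) with
      | none => exact absurd (((PySem.List.max?_eq_none_iff _ _).mp hmx)) hsub_ne
      | some m' =>
        have hm'_sub : m' ∈ sub := PySem.List.max?_mem hmx
        have hm'_prop := List.mem_filter.mp (by rwa [hsubdef] at hm'_sub)
        have hm'_le : m' ≤ e := by
          have := hm'_prop.2; simp at this; exact this.2
        have h1 : m ≤ m' := by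
          have := PySem.List.max?_isMax hmx m hm_sub
          omega
        have h2 : m' ≤ m := by
          obtain ⟨j, hj, hjeq⟩ := List.mem_iff_getElem.mp (hperm.mem_iff.mpr hm'_prop.1)
          have hjlt : j < lo := by
            by_contra hge
            have := hright j hj (by omega)
            omega
          have hle2 : L[j] ≤ L[lo - 1] := hpg j (lo - 1) hj hlo1 (by omega)
          rw [hjeq] at hle2
          rw [hmval]; exact hle2
        exact congrArg some (le_antisymm h2 h1)
    simp only [pvStepA, pvStepB, ← hsubdef, ← hlodef, ← hmdef]
    rw [if_pos hsub_ne, if_pos (by simp [hlo0, hstart]), hmax]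
    rfl
  · -- no index in (start, end]: both programs only advance end
    have hsub_nil : sub = [] := by
      rw [hsubdef, List.filter_eq_nil_iff]
      intro y hy hyp
      simp only [Bool.and_eq_true, decide_eq_true_eq] at hyp
      obtain ⟨hy1, hy2⟩ := hyp
      obtain ⟨j, hj, hjeq⟩ := List.mem_iff_getElem.mp (hperm.mem_iff.mpr hy)
      have hjlt : j < lo := by
        by_contra hge
        have := hright j hj (by omega)
        omega
      have hlo0 : 0 < lo := by omega
      have hns : ¬ start < L.getD (lo - 1) 0 := fun h => hc ⟨hlo0, h⟩
      have hlo1 : lo - 1 < L.length := by omega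
      have hmval : L.getD (lo - 1) 0 = L[lo - 1] := List.getD_eq_getElem L 0 hlo1
      have hle2 : L[j] ≤ L[lo - 1] := hpg j (lo - 1) hj hlo1 (by omega)
      rw [hjeq] at hle2
      rw [hmval] at hns
      omega
    simp only [pvStepA, pvStepB, ← hsubdef, ← hlodef]
    rw [if_neg (by simp [hsub_nil]), if_neg (by simpa using hc)]

-- ===== VERDICT (by name: the statement is the Claim_ definition above) =====
theorem split_sent_spec : Claim_equal_split_sent := by
  intro possible_idx num_split max_length word_list _
  unfold Spec_split_sent split_sent split_sent_alt
  by_cases h : possible_idx = []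
  · simp [h]
  · have hlen : possible_idx.length > 0 := List.length_pos_of_ne_nil h
    rw [if_pos hlen, if_neg h]
    have hstep : pvStepA possible_idx max_length word_list =
        pvStepB (PySem.List.sorted possible_idx (fun x => x)) max_length word_list :=
      funext fun st => funext fun i => pvStep_eq possible_idx max_length word_list st i
    rw [hstep]
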